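-- pv_equiv track=rewrite | github.com/Murmur-ops/RadarSimPublic | src/waveforms.py | _generate_welch_costas
-- ===== SOURCE A (Python) =====
-- def _generate_welch_costas(N: int) -> list:
--     """
--     Generate Welch-Costas sequence
--
--     Args:
--         N: Sequence length (should be prime)
--
--     Returns:
--         Frequency hopping sequence
--     """
--     # Find primitive root modulo N
--     if N <= 2:
--         return list(range(N))
--
--     # Simple Welch construction for prime N
--     g = 2  # Try 2 as primitive root
--     sequence = []
--     for i in range(N - 1):
--         sequence.append((g**i) % N)
--
--     return sequence
-- ===== SOURCE B (Python) =====
-- def _generate_welch_costas(N: int) -> list: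
--     """Welch-Costas sequence via a running product mod N (O(N) small-int ops
--     instead of recomputing g**i as a bignum each iteration)."""
--     if N <= 2:
--         return list(range(N))
--     sequence = []
--     x = 1  # 2**0 % N for N > 2
--     for _ in range(N - 1):
--         sequence.append(x)
--         x = (x * 2) % N
--     return sequence
-- ===== Notes on version B (the rewrite author's own statement) =====
-- stated objective: faster
-- what changed: Replaces recomputing g**i as a growing bignum each iteration with a running product kept reduced mod N, turning O(N^2)-bit work into O(N) small-int multiplications.
import Mathlib
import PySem

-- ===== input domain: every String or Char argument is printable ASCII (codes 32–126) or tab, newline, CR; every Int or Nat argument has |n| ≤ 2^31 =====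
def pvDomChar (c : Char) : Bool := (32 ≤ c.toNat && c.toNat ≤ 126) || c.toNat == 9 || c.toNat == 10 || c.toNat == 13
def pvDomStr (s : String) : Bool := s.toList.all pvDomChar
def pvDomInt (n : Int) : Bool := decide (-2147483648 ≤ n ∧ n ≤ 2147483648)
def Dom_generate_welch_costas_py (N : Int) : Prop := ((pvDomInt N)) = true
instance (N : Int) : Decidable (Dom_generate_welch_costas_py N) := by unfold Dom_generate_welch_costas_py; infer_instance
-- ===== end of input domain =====

-- B computes the same sequence with a running product kept reduced mod N instead of
-- recomputing g**i from scratch each iteration (objective: faster).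

-- ===== PORT A =====
def generate_welch_costas_py (N : Int) : List Int :=
  if N ≤ 2 then PySem.List.pyRange 0 N 1
  else (PySem.List.pyRange 0 (N - 1) 1).foldl
    (fun seq i => seq ++ [PySem.Int.mod (2 ^ i.toNat) N]) []

-- ===== PORT B =====
-- the 'for _ in range(N-1)' loop of Source B: fuel = remaining iterations, x = running product
def wcLoop (fuel : Nat) (x N : Int) : List Int :=
  match fuel with
  | 0 => []
  | k + 1 => x :: wcLoop k (PySem.Int.mod (x * 2) N) N

def generate_welch_costas_py_alt (N : Int) : List Int :=
  if N ≤ 2 then PySem.List.pyRange 0 N 1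
  else wcLoop (N - 1).toNat 1 N

-- ===== PRECONDITION & SPEC =====
def Spec_generate_welch_costas_py (N : Int) (out : List Int) : Prop := out = generate_welch_costas_py_alt N
instance (N : Int) (out : List Int) : Decidable (Spec_generate_welch_costas_py N out) := by unfold Spec_generate_welch_costas_py; infer_instance

-- ===== CLAIM (what is proved, stated in full; the proofs are below) =====
def Claim_equal_generate_welch_costas_py : Prop := ∀ (N : Int), Dom_generate_welch_costas_py N → Spec_generate_welch_costas_py N (generate_welch_costas_py N)

-- ===== LEMMAS AND PROOFS =====

theorem foldl_snoc_eq_map {α β : Type} (f : α → β) :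
    ∀ (l : List α) (acc : List β),
      List.foldl (fun s i => s ++ [f i]) acc l = acc ++ l.map f := by
  intro l
  induction l with
  | nil => intro acc; simp
  | cons a t ih => intro acc; simp [List.foldl, ih]

theorem mod_two_pow_step (N : Int) (hN : 2 < N) (s : Nat) :
    PySem.Int.mod (PySem.Int.mod (2 ^ s) N * 2) N = PySem.Int.mod (2 ^ (s + 1)) N := by
  rw [PySem.Int.mod_eq_emod_of_pos (a := PySem.Int.mod (2 ^ s) N * 2) (by omega : (0:Int) < N),
      PySem.Int.mod_eq_emod_of_pos (a := 2 ^ (s + 1)) (by omega : (0:Int) < N),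
      PySem.Int.mod_eq_emod_of_pos (a := 2 ^ s) (by omega : (0:Int) < N)]
  conv_rhs => rw [pow_succ, Int.mul_emod]
  conv_lhs => rw [Int.mul_emod]
  simp [Int.emod_emod_of_dvd]

theorem wcLoop_eq_map (N : Int) (hN : 2 < N) :
    ∀ (m s : Nat),
      wcLoop m (PySem.Int.mod (2 ^ s) N) N
        = (List.range m).map (fun k => PySem.Int.mod (2 ^ (s + k)) N) := by
  intro m
  induction m with
  | zero => intro s; simp [wcLoop]
  | succ k ih =>
    intro s
    rw [wcLoop, mod_two_pow_step N hN s, ih (s + 1), List.range_succ_eq_map,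
        List.map_cons, List.map_map]
    refine List.cons_eq_cons.mpr ⟨by norm_num, List.map_congr_left ?_⟩
    intro j _
    simp only [Function.comp]
    have hsj : s + 1 + j = s + (j + 1) := by omega
    rw [hsj]

theorem mod_one_eq (N : Int) (hN : 2 < N) : PySem.Int.mod (2 ^ 0) N = 1 := by
  rw [PySem.Int.mod_eq_emod_of_pos (a := (2:Int) ^ 0) (by omega : (0:Int) < N)]
  rw [pow_zero, Int.emod_eq_of_lt (by omega) (by omega)]

-- ===== VERDICT (by name: the statement is the Claim_ definition above) =====
theorem generate_welch_costas_py_spec : Claim_equal_generate_welch_costas_py := by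
  intro N _
  unfold Spec_generate_welch_costas_py generate_welch_costas_py generate_welch_costas_py_alt
  by_cases h : N ≤ 2
  · simp [h]
  · push Not at h
    simp only [if_neg (by omega : ¬ N ≤ 2)]
    rw [foldl_snoc_eq_map, List.nil_append, PySem.List.pyRange_one]
    have h1 : wcLoop (N - 1).toNat 1 N = wcLoop (N - 1).toNat (PySem.Int.mod (2 ^ 0) N) N := by
      rw [mod_one_eq N h]
    rw [h1, wcLoop_eq_map N h _ 0]
    simp only [List.map_map, sub_zero]
    apply List.map_congr_left
    intro k _
    simp [Function.comp]
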